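-- pv_equiv track=rewrite | github.com/guyleaf/FLVCD | data/dataset/qa_task.py | separate_dialog
-- ===== SOURCE A (Python) =====
-- def separate_dialog(dialog):
--     story_history = []
--     qa = []
--     for line in dialog:
--         if line.find("\t") >= 0:
--             line = line.split("\t")
--             qa.append((story_history.copy(), line[0][:-1], line[1]))
--         else:
--             story_history.append(line)
--     return qa
-- ===== SOURCE B (Python) =====
-- def separate_dialog(dialog):
--     # No running state: for each tab line, its story context is recomputed
--     # by filtering the non-tab lines out of the prefix before it.
--     return [
--         ([l for l in dialog[:i] if "\t" not in l],
--          line.split("\t")[0][:-1],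
--          line.split("\t")[1])
--         for i, line in enumerate(dialog)
--         if "\t" in line
--     ]
-- ===== Notes on version B (the rewrite author's own statement) =====
-- stated objective: alternative
-- what changed: A maintains a mutable story accumulator in one stateful pass and snapshots it at each QA line; B keeps no state at all and instead, for each tab line found by enumerate, recomputes its context as the tab-free filter of the prefix dialog[:i].
import Mathlib
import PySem

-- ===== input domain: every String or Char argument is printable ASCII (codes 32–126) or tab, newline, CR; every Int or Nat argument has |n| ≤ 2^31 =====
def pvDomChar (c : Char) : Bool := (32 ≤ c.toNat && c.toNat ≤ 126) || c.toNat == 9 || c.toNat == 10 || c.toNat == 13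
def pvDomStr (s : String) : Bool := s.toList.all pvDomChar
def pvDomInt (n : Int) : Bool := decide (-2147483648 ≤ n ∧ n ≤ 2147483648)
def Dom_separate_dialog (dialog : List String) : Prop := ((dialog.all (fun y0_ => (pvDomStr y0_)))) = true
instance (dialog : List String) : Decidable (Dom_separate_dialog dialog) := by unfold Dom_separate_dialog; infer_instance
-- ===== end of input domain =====

-- B replaces A's stateful story accumulator by a stateless comprehension: each
-- QA line's context is recomputed as the tab-free filter of the prefix before it.

-- ===== PORT A =====
-- line.split("\t") always yields ≥ 2 parts when a tab is present, so the
-- `.getD` defaults for parts[0]/parts[1] are never taken (Python never raises here).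
def pvQ (line : String) : String :=
  PySem.Str.slice ((PySem.List.pyGet? ((PySem.Str.split? line "\t").getD []) (0 : Int)).getD "") none (some (-1))

def pvA (line : String) : String :=
  (PySem.List.pyGet? ((PySem.Str.split? line "\t").getD []) (1 : Int)).getD ""

-- the loop of A: state (story_history, qa), qa entries built eagerly with a story copy
def sepA : List String → List String → List (List String × String × String) → List (List String × String × String)
  | [], _, qa => qa
  | line :: rest, story, qa =>
    if 0 ≤ PySem.Str.find line "\t" then
      sepA rest story (qa ++ [(story, pvQ line, pvA line)])
    else
      sepA rest (story ++ [line]) qa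

def separate_dialog (dialog : List String) : List (List String × String × String) :=
  sepA dialog [] []

-- ===== PORT B =====
-- the comprehension of B: for each tab line at index i, filter dialog[:i]
def separate_dialog_alt (dialog : List String) : List (List String × String × String) :=
  (PySem.List.enumerate dialog).filterMap (fun p =>
    if PySem.Str.isIn "\t" p.2 then
      some ((PySem.List.slice dialog none (some p.1)).filter (fun l => !PySem.Str.isIn "\t" l),
            pvQ p.2, pvA p.2)
    else none)

-- ===== PRECONDITION & SPEC =====
def Spec_separate_dialog (dialog : List String) (out : List (List String × String × String)) : Prop := out = separate_dialog_alt dialog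
instance (dialog : List String) (out : List (List String × String × String)) : Decidable (Spec_separate_dialog dialog out) := by unfold Spec_separate_dialog; infer_instance

-- ===== CLAIM (what is proved, stated in full; the proofs are below) =====
def Claim_equal_separate_dialog : Prop := ∀ (dialog : List String), Dom_separate_dialog dialog → Spec_separate_dialog dialog (separate_dialog dialog)

-- ===== LEMMAS AND PROOFS =====

-- the two tab tests agree: find(line,"\t") >= 0  iff  "\t" in line
theorem pvCond_eq (line : String) :
    (0 ≤ PySem.Str.find line "\t") ↔ PySem.Str.isIn "\t" line = true := by
  rw [PySem.Str.find_nonneg_iff, PySem.Str.isIn_iff_infix]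

-- A's accumulator-append law
theorem sepA_append (dialog : List String) : ∀ (story : List String) (qa : List (List String × String × String)),
    sepA dialog story qa = qa ++ sepA dialog story [] := by
  induction dialog with
  | nil => intro story qa; simp [sepA]
  | cons line rest ih =>
    intro story qa
    by_cases h : 0 ≤ PySem.Str.find line "\t"
    · simp only [sepA, if_pos h]
      rw [ih story (qa ++ _), ih story ([] ++ _)]
      simp
    · simp only [sepA, if_neg h]
      exact ih (story ++ [line]) qa

-- shifting the start of enumerate
theorem enumerate_shift {α : Type} (xs : List α) : ∀ (s : Int),
    PySem.List.enumerate xs (s + 1) = (PySem.List.enumerate xs s).map (fun p => (p.1 + 1, p.2)) := by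
  induction xs with
  | nil => intro s; simp [PySem.List.enumerate_nil]
  | cons x xs ih =>
    intro s
    rw [PySem.List.enumerate_cons, PySem.List.enumerate_cons, List.map_cons, ih (s + 1)]

-- B's core, as a function of the list whose prefixes are sliced
def bCore (full dialog : List String) : List (List String × String × String) :=
  (PySem.List.enumerate dialog).filterMap (fun p =>
    if PySem.Str.isIn "\t" p.2 then
      some ((PySem.List.slice full none (some p.1)).filter (fun l => !PySem.Str.isIn "\t" l),
            pvQ p.2, pvA p.2)
    else none)

theorem bCore_cons (line : String) (rest : List String) :
    bCore (line :: rest) (line :: rest) =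
      if PySem.Str.isIn "\t" line then
        ([], pvQ line, pvA line) :: bCore rest rest
      else
        (bCore rest rest).map (fun m => (line :: m.1, m.2.1, m.2.2)) := by
  unfold bCore
  rw [PySem.List.enumerate_cons, List.filterMap_cons, enumerate_shift, List.filterMap_map]
  have hslice : ∀ p : Int × String, p ∈ PySem.List.enumerate rest 0 →
      PySem.List.slice (line :: rest) none (some (p.1 + 1)) =
        line :: PySem.List.slice rest none (some p.1) := by
    intro p hp
    obtain ⟨k, hk, rfl⟩ := (PySem.List.mem_enumerate_iff _ _ _).mp hp
    have h1 : (0 : Int) + (k : Int) + 1 = ((k + 1 : Nat) : Int) := by push_cast; ring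
    have h2 : (0 : Int) + (k : Int) = ((k : Nat) : Int) := by omega
    rw [h1, h2, PySem.List.slice_to_natCast, PySem.List.slice_to_natCast, List.take_succ_cons]
  have h0 : PySem.List.slice (line :: rest) none (some ((0 : Int))) = ([] : List String) := by
    have : ((0 : Int)) = ((0 : Nat) : Int) := by norm_num
    rw [this, PySem.List.slice_to_natCast]; simp
  by_cases h : PySem.Str.isIn "\t" line = true
  · simp only [h, if_true, h0, List.filter_nil]
    congr 1
    apply List.filterMap_congr
    intro p hp
    rw [Function.comp_apply, hslice p hp]
    by_cases ht : PySem.Str.isIn "\t" p.2 = true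
    · rw [if_pos ht, if_pos ht, List.filter_cons_of_neg (by simpa using h)]
    · rw [if_neg ht, if_neg ht]
  · simp only [h, if_false, Bool.false_eq_true]
    rw [List.map_filterMap]
    apply List.filterMap_congr
    intro p hp
    rw [Function.comp_apply, hslice p hp]
    by_cases ht : PySem.Str.isIn "\t" p.2 = true
    · rw [if_pos ht, if_pos ht, List.filter_cons_of_pos (by simpa using h), Option.map_some]
    · rw [if_neg ht, if_neg ht, Option.map_none]

-- main invariant: A's eager snapshots are B's filtered prefixes, shifted by story
theorem sepA_eq_bCore (dialog : List String) : ∀ (story : List String),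
    sepA dialog story [] = (bCore dialog dialog).map (fun m => (story ++ m.1, m.2.1, m.2.2)) := by
  induction dialog with
  | nil => intro story; simp [sepA, bCore, PySem.List.enumerate_nil]
  | cons line rest ih =>
    intro story
    rw [bCore_cons]
    by_cases h : 0 ≤ PySem.Str.find line "\t"
    · have hb : PySem.Str.isIn "\t" line = true := (pvCond_eq line).mp h
      simp only [sepA, if_pos h, hb, if_true]
      rw [sepA_append, ih story]
      simp
    · have hb : ¬ PySem.Str.isIn "\t" line = true := fun hx => h ((pvCond_eq line).mpr hx)
      simp only [sepA, if_neg h, hb, Bool.false_eq_true, if_false]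
      rw [ih (story ++ [line]), List.map_map]
      simp [Function.comp_def]

-- ===== VERDICT (by name: the statement is the Claim_ definition above) =====
theorem separate_dialog_spec : Claim_equal_separate_dialog := by
  intro dialog _
  show separate_dialog dialog = separate_dialog_alt dialog
  have : separate_dialog_alt dialog = bCore dialog dialog := rfl
  rw [this, separate_dialog, sepA_eq_bCore dialog []]
  simp
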